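-- pv_equiv track=rewrite | github.com/Liujia127/PLC-Transition-Sequence | huafen/last_ban.py | find_sorted_substrings
-- ===== SOURCE A (Python) =====
-- def build_suffix_array(input_string):
--     suffixes = [(input_string[i:], i) for i in range(len(input_string))]
--     suffixes.sort()
--     suffix_array = [suffix[1] for suffix in suffixes]
--     return suffix_array
--
-- def find_sorted_substrings(input_string):
--     suffix_array = build_suffix_array(input_string)
--     substr_freq = {}  # 用于存储子串频率的字典
--
--     for i in range(len(suffix_array)):
--         suffix = input_string[suffix_array[i]:]
--         for j in range(2, len(suffix) + 1):  # 从长度为2的子串开始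
--             substring = suffix[:j]
--             if substring in substr_freq:
--                 substr_freq[substring] += 1
--             else:
--                 substr_freq[substring] = 1
--
--     # 按频率高低排序，并只保留频率和长度大于等于2的子串
--     sorted_substrings = [(substring, freq) for substring, freq in substr_freq.items() if freq >= 2]
--     sorted_substrings.sort(key=lambda x: (-x[1], x[0]))  # 按频率降序排序，相同频率按字典序升序排序
--
--     # 删除被其他子串包含且频率相同的较短子串
--     result = []
--     for substring, freq in sorted_substrings:
--         is_contained = False
--         for other_substring, other_freq in sorted_substrings:
--             if substring != other_substring and substring in other_substring and freq == other_freq: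
--                 is_contained = True
--                 break
--         if not is_contained:
--             result.append((substring, freq))
--
--     return result
-- ===== SOURCE B (Python) =====
-- def find_sorted_substrings(input_string):
--     # Count substrings by sorting all of them and run-length encoding the
--     # sorted list (no hash counting); filter survivors per frequency group.
--     n = len(input_string)
--     subs = sorted(input_string[i:j] for i in range(n) for j in range(i + 2, n + 1))
--     counted = []
--     for s in subs:
--         if counted and counted[-1][0] == s:
--             counted[-1] = (s, counted[-1][1] + 1)
--         else:
--             counted.append((s, 1))
--     items = sorted((p for p in counted if p[1] >= 2), key=lambda p: (-p[1], p[0]))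
--     # a substring can only be hidden by an equal-frequency (longer) one,
--     # so index the survivors by frequency and scan only the own group
--     by_freq = {}
--     for s, f in items:
--         by_freq.setdefault(f, []).append(s)
--     return [(s, f) for s, f in items
--             if all(s == t or s not in t for t in by_freq[f])]
-- ===== Notes on version B (the rewrite author's own statement) =====
-- stated objective: alternative
-- what changed: B replaces A's suffix-array + hash-dict counting by sort-then-run-length-encode (all substrings are sorted once and counts read off adjacent runs, no dict), and replaces A's all-pairs containment filter by a frequency-group index so each substring is only tested against its own equal-frequency group.
import Mathlib
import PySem

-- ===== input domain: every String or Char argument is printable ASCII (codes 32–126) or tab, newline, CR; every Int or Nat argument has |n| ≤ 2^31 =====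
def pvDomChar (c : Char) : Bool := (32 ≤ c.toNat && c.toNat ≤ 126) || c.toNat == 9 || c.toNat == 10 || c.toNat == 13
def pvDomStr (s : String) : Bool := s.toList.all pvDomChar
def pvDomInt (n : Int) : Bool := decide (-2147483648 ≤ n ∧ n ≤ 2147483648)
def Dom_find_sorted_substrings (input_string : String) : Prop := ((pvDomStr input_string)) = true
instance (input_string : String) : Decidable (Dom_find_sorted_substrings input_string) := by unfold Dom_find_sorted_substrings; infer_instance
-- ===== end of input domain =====

-- B counts substrings by sorting them all once and run-length-encoding the sorted list
-- (no suffix array, no counting dict) and filters containment per frequency group.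

-- ===== PORT A =====
def build_suffix_array (input_string : String) : List Int :=
  let suffixes := (PySem.List.pyRange 0 (PySem.Str.len input_string) 1).map
    (fun i => (PySem.Str.slice input_string (some i) none, i))
  let suffixes' := PySem.List.sorted2 suffixes (fun p => p.1) (fun p => p.2)
  suffixes'.map (fun suffix => suffix.2)

def find_sorted_substrings (input_string : String) : List (String × Int) :=
  let suffix_array := build_suffix_array input_string
  let substr_freq : PySem.Dict String Int :=
    suffix_array.foldl (fun d idx =>
      let suffix := PySem.Str.slice input_string (some idx) none
      (PySem.List.pyRange 2 (PySem.Str.len suffix + 1) 1).foldl (fun d j =>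
        let substring := PySem.Str.slice suffix none (some j)
        if d.contains substring then d.insert substring (d.getD substring 0 + 1)
        else d.insert substring 1) d) PySem.Dict.empty
  let sorted_substrings := PySem.List.sorted2
    (substr_freq.items.filter (fun p => decide (p.2 ≥ 2)))
    (fun x => -x.2) (fun x => x.1)
  sorted_substrings.foldl (fun result p =>
    let is_contained := sorted_substrings.any (fun q =>
      decide (p.1 ≠ q.1) && PySem.Str.isIn p.1 q.1 && decide (p.2 = q.2))
    if is_contained then result else result ++ [p]) []

-- ===== PORT B =====
def find_sorted_substrings_alt (input_string : String) : List (String × Int) :=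
  let n := PySem.Str.len input_string
  let subs := PySem.List.sorted
    ((PySem.List.pyRange 0 n 1).flatMap (fun i =>
      (PySem.List.pyRange (i + 2) (n + 1) 1).map (fun j =>
        PySem.Str.slice input_string (some i) (some j)))) (fun s => s)
  let counted := subs.foldl (fun counted s =>
    match counted.getLast? with
    | some (t, c) => if t = s then counted.dropLast ++ [(t, c + 1)] else counted ++ [(s, 1)]
    | none => counted ++ [(s, 1)]) ([] : List (String × Int))
  let items := PySem.List.sorted2 (counted.filter (fun p => decide (p.2 ≥ 2)))
    (fun p => -p.2) (fun p => p.1)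
  let by_freq := items.foldl (fun (d : PySem.Dict Int (List String)) p =>
    d.insert p.2 (d.getD p.2 [] ++ [p.1])) PySem.Dict.empty
  -- by_freq[f] is ported as getD with []: every f looked up was inserted above
  items.filter (fun p => (by_freq.getD p.2 []).all (fun t => p.1 == t || ! PySem.Str.isIn p.1 t))

-- ===== PRECONDITION & SPEC =====
def Spec_find_sorted_substrings (input_string : String) (out : List (String × Int)) : Prop := out = find_sorted_substrings_alt input_string
instance (input_string : String) (out : List (String × Int)) : Decidable (Spec_find_sorted_substrings input_string out) := by unfold Spec_find_sorted_substrings; infer_instance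

-- ===== CLAIM (what is proved, stated in full; the proofs are below) =====
def Claim_equal_find_sorted_substrings : Prop := ∀ (input_string : String), Dom_find_sorted_substrings input_string → Spec_find_sorted_substrings input_string (find_sorted_substrings input_string)

-- ===== LEMMAS AND PROOFS =====

-- All substrings s[i:j] with i+2 ≤ j ≤ n, for one fixed start i.
def pvInner (s : String) (i : Int) : List String :=
  (PySem.List.pyRange (i + 2) (PySem.Str.len s + 1) 1).map
    (fun j => PySem.Str.slice s (some i) (some j))

-- 1. the inner loop of A, for a start index 0 ≤ i < len s, lists exactly pvInner s i
lemma innerA_eq_pvInner (s : String) (i : Int) (h0 : 0 ≤ i) (h1 : i < PySem.Str.len s) :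
    (PySem.List.pyRange 2 (PySem.Str.len (PySem.Str.slice s (some i) none) + 1) 1).map
      (fun j => PySem.Str.slice (PySem.Str.slice s (some i) none) none (some j))
    = pvInner s i := by
  unfold pvInner
  lift i to ℕ using h0 with a
  simp only [PySem.Str.len_eq] at h1 ⊢
  have hsuf : (PySem.Str.slice s (some (a : Int)) none).toList = s.toList.drop a := by
    simp [PySem.List.slice_from_natCast]
  simp only [hsuf, List.length_drop]
  rw [PySem.List.pyRange_one, PySem.List.pyRange_one, List.map_map, List.map_map]
  have hm : ((s.toList.length - a : ℕ) + 1 - 2 : Int).toNat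
      = ((s.toList.length : Int) + 1 - ((a : Int) + 2)).toNat := by omega
  rw [hm]
  apply List.map_congr_left
  intro k hk
  simp only [Function.comp_apply]
  apply String.toList_inj.mp
  have h2 : (0:Int) ≤ 2 + (k : Int) := by omega
  simp only [PySem.Str.toList_slice, PySem.Chars.slice_eq_listSlice, hsuf]
  rw [PySem.List.slice_to _ h2]
  have h3 : ((a : Int) + 2 + (k : Int)) = (a : Int) + ((2 + k : ℕ) : Int) := by push_cast; ring
  rw [h3, PySem.List.slice_natCast_add]
  congr 1

-- 2. the suffix array is a permutation of range(len s)
lemma suffix_array_perm (s : String) :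
    (build_suffix_array s).Perm (PySem.List.pyRange 0 (PySem.Str.len s) 1) := by
  unfold build_suffix_array
  dsimp only
  refine ((PySem.List.sorted2_perm _ _ _ _).map (fun (p : String × Int) => p.2)).trans ?_
  rw [List.map_map]
  simp [Function.comp_def]

-- 3. A's frequency dict is the counter of its occurrence list
lemma dictA_eq_counter (s : String) :
    (build_suffix_array s).foldl (fun d idx =>
      let suffix := PySem.Str.slice s (some idx) none
      (PySem.List.pyRange 2 (PySem.Str.len suffix + 1) 1).foldl (fun d j =>
        let substring := PySem.Str.slice suffix none (some j)
        if d.contains substring then d.insert substring (d.getD substring 0 + 1)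
        else d.insert substring 1) d) PySem.Dict.empty
    = PySem.Dict.counter ((build_suffix_array s).flatMap (pvInner s)) := by
  rw [← PySem.Dict.foldl_insert_getD_add_one_eq_counter, List.foldl_flatMap]
  apply PySem.List.foldl_congr_mem
  intro d idx hmem
  have hidx : 0 ≤ idx ∧ idx < PySem.Str.len s := by
    have hm := (suffix_array_perm s).mem_iff.mp hmem
    rw [PySem.List.mem_pyRange_one] at hm
    exact hm
  dsimp only
  rw [← innerA_eq_pvInner s idx hidx.1 hidx.2, List.foldl_map]
  apply PySem.List.foldl_congr_mem
  intro d' j _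
  by_cases hc : (d'.contains (PySem.Str.slice (PySem.Str.slice s (some idx) none) none (some j))) = true
  · simp [hc]
  · simp only [hc, if_false, Bool.false_eq_true]
    rw [PySem.Dict.getD_of_not_contains (h := by simpa using hc)]
    norm_num

-- 4. the two occurrence lists are permutations of each other
lemma occ_perm (s : String) :
    ((build_suffix_array s).flatMap (pvInner s)).Perm
      ((PySem.List.pyRange 0 (PySem.Str.len s) 1).flatMap (pvInner s)) := by
  exact (suffix_array_perm s).flatMap (fun a _ => List.Perm.refl _)

-- 5. B's run-length encoding of a (≤)-sorted list is a map over a nodup key list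
lemma rle_spec (zs : List String) (h : zs.Pairwise (· ≤ ·)) :
    ∃ K : List String, K.Nodup ∧ (∀ u, u ∈ K ↔ u ∈ zs) ∧ K.getLast? = zs.getLast? ∧
      zs.foldl (fun counted s =>
        match counted.getLast? with
        | some (t, c) => if t = s then counted.dropLast ++ [(t, c + 1)] else counted ++ [(s, 1)]
        | none => counted ++ [(s, 1)]) ([] : List (String × Int)) = K.map (fun u => (u, (zs.count u : Int))) := by
  induction zs using List.reverseRecOn with
  | nil => exact ⟨[], by simp⟩
  | append_singleton ts s ih =>
    rw [List.pairwise_append] at h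
    obtain ⟨hts, -, hle⟩ := h
    obtain ⟨K, hnd, hmem, hlast, heq⟩ := ih hts
    rw [List.foldl_append, List.foldl_cons, List.foldl_nil, heq]
    rcases hK : K.getLast? with _ | u
    · -- K = [], hence ts = []
      have hKnil : K = [] := List.getLast?_eq_none_iff.mp hK
      have htsnil : ts = [] := by
        rw [hKnil] at hmem
        exact List.eq_nil_iff_forall_not_mem.mpr (fun a ha => by simpa using (hmem a).mpr ha)
      subst hKnil htsnil
      exact ⟨[s], by simp⟩
    · -- K ends in u = ts.getLast
      have huK : u ∈ K := List.mem_of_getLast? hK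
      have huts : u ∈ ts := (hmem u).mp huK
      have hKsplit : K.dropLast ++ [u] = K := List.dropLast_append_getLast? u hK
      have hmap : (K.map (fun v => (v, (ts.count v : Int)))).getLast? = some (u, (ts.count u : Int)) := by
        rw [List.getLast?_map, hK]; rfl
      rw [hmap]
      dsimp only
      by_cases hus : u = s
      · -- extend the last run
        rw [if_pos hus]
        subst hus
        refine ⟨K, hnd, ?_, ?_, ?_⟩
        · intro v
          constructor
          · intro hv; exact List.mem_append.mpr (Or.inl ((hmem v).mp hv))
          · intro hv
            rcases List.mem_append.mp hv with hv | hv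
            · exact (hmem v).mpr hv
            · rw [List.mem_singleton] at hv; subst hv; exact huK
        · rw [hK, List.getLast?_concat]
        · have hdrop : ∀ v ∈ K.dropLast, v ≠ u := by
            intro v hv hvu
            have hnd' : (K.dropLast ++ [u]).Nodup := hKsplit.symm ▸ hnd
            rw [List.nodup_append] at hnd'
            exact hnd'.2.2 v hv u (List.mem_singleton.mpr rfl) hvu
          conv_lhs => rw [← hKsplit]
          conv_rhs => rw [← hKsplit]
          rw [List.map_append, List.map_append, List.map_singleton, List.map_singleton,
            List.dropLast_concat]
          congr 1
          · apply List.map_congr_left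
            intro v hv
            rw [List.count_append, List.count_singleton]
            simp [Ne.symm (hdrop v hv)]
          · simp [List.count_append]
      · -- start a new run: s is not in ts
        have hlast' : ts.getLast? = some u := hlast ▸ hK
        have hts_split : ts.dropLast ++ [u] = ts := List.dropLast_append_getLast? u hlast'
        have hsts : s ∉ ts := by
          intro hsin
          apply hus
          have h1 : u ≤ s := hle u huts s (by simp)
          have h2 : s ≤ u := by
            have hpa : (ts.dropLast ++ [u]).Pairwise (· ≤ ·) := by rw [hts_split]; exact hts
            have hsin' : s ∈ ts.dropLast ++ [u] := by rw [hts_split]; exact hsin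
            rcases List.mem_append.mp hsin' with hv | hv
            · exact (List.pairwise_append.mp hpa).2.2 s hv u (by simp)
            · rw [List.mem_singleton] at hv; exact le_of_eq hv
          exact le_antisymm h1 h2
        rw [if_neg hus]
        refine ⟨K ++ [s], ?_, ?_, ?_, ?_⟩
        · rw [List.nodup_append]
          refine ⟨hnd, List.nodup_singleton s, ?_⟩
          intro v hv b hb
          rw [List.mem_singleton] at hb
          subst hb
          exact fun hvs => hsts (hvs ▸ (hmem v).mp hv)
        · intro v; simp [hmem]
        · simp
        · rw [List.map_append, List.map_singleton]
          congr 1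
          · apply List.map_congr_left
            intro v hv
            have hvts : v ∈ ts := (hmem v).mp hv
            have hvs : v ≠ s := fun hvs => hsts (hvs ▸ hvts)
            rw [List.count_append, List.count_singleton]
            simp [Ne.symm hvs]
          · simp [List.count_append, List.count_eq_zero_of_not_mem hsts]


-- 6. B's RLE pair list is a permutation of A's counter item list (same occurrences)
lemma items_counter_perm (xs ys : List String) (h : xs.Perm ys) :
    (PySem.Dict.counter xs).items.Perm (PySem.Dict.counter ys).items := by
  rw [PySem.Dict.items_counter, PySem.Dict.items_counter]
  have hcnt : (fun (k : String) => (k, (xs.count k : Int))) = (fun k => (k, (ys.count k : Int))) :=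
    funext fun k => by rw [h.count_eq]
  rw [hcnt]
  exact ((List.perm_ext_iff_of_nodup (PySem.Set.nodup_ofList _) (PySem.Set.nodup_ofList _)).mpr
    (fun a => by simp only [PySem.Set.mem_ofList]; exact h.mem_iff)).map _

lemma counted_perm_counter_items (xs : List String) :
    ((PySem.List.sorted xs (fun s => s)).foldl (fun counted s =>
        match counted.getLast? with
        | some (t, c) => if t = s then counted.dropLast ++ [(t, c + 1)] else counted ++ [(s, 1)]
        | none => counted ++ [(s, 1)]) ([] : List (String × Int))).Perm
      (PySem.Dict.counter xs).items := by
  have hpw : (PySem.List.sorted xs (fun s => s) (reverse := false)).Pairwise (· ≤ ·) :=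
    PySem.List.sorted_pairwise xs (fun s => s)
  obtain ⟨K, hnd, hmem, -, heq⟩ := rle_spec _ hpw
  rw [heq, PySem.Dict.items_counter]
  have hcnt : (fun u => (u, ((PySem.List.sorted xs (fun s => s)).count u : Int)))
      = (fun u => (u, (xs.count u : Int))) :=
    funext fun u => by rw [(PySem.List.sorted_perm xs (fun s => s) false).count_eq]
  rw [hcnt]
  exact ((List.perm_ext_iff_of_nodup hnd (PySem.Set.nodup_ofList _)).mpr
    (fun a => by rw [hmem, PySem.List.mem_sorted, PySem.Set.mem_ofList])).map _


-- 7. a two-key sort is a one-key sort under the lexicographic order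
lemma sorted2_eq_sorted_lex {α : Type} (xs : List α) (k1 : α → Int) (k2 : α → String) :
    PySem.List.sorted2 xs k1 k2 = PySem.List.sorted xs (fun a => toLex (k1 a, k2 a)) := by
  rw [PySem.List.sorted_eq_foldl_insertBy]
  show List.foldl (fun acc x => PySem.List.insertBy
    (fun a b => decide (k1 a < k1 b) || !decide (k1 b < k1 a) && decide (k2 a < k2 b)) x acc) [] xs = _
  have hf : (fun (a b : α) => decide (k1 a < k1 b) || !decide (k1 b < k1 a) && decide (k2 a < k2 b))
      = (fun a b => decide (toLex (k1 a, k2 a) < toLex (k1 b, k2 b))) := by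
    funext a b
    rw [show (decide (toLex (k1 a, k2 a) < toLex (k1 b, k2 b)))
        = decide (k1 a < k1 b ∨ k1 a = k1 b ∧ k2 a < k2 b) from
      decide_eq_decide.mpr Prod.Lex.lt_iff]
    by_cases h1 : k1 a < k1 b <;> by_cases h2 : k1 a = k1 b <;> by_cases h3 : k2 a < k2 b <;>
      simp [h1, h2, h3]
    omega
  rw [hf]

-- 8. the sorted stage agrees on permuted inputs
lemma sorted_stage_eq (xs ys : List (String × Int)) (h : xs.Perm ys) :
    PySem.List.sorted2 xs (fun p => -p.2) (fun p => p.1)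
    = PySem.List.sorted2 ys (fun p => -p.2) (fun p => p.1) := by
  rw [sorted2_eq_sorted_lex, sorted2_eq_sorted_lex]
  refine PySem.List.sorted_eq_sorted_of_perm _ _ _ ?_ h
  intro a b hab
  have h2 := congrArg ofLex hab
  simp only [ofLex_toLex, Prod.mk.injEq] at h2
  exact Prod.ext h2.2 (by omega)

-- 9. B's frequency-group dict lists, per frequency, the survivors of that frequency
lemma group_getD (L : List (String × Int)) (f : Int) :
    (L.foldl (fun (d : PySem.Dict Int (List String)) p =>
        d.insert p.2 (d.getD p.2 [] ++ [p.1])) PySem.Dict.empty).getD f []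
    = (L.filter (fun q => decide (q.2 = f))).map Prod.fst := by
  induction L using List.reverseRecOn with
  | nil => simp [PySem.Dict.getD, PySem.Dict.get?, PySem.Dict.empty]
  | append_singleton ts p ih =>
    rw [List.foldl_append, List.foldl_cons, List.foldl_nil, PySem.Dict.getD_insert,
      List.filter_append, List.map_append]
    by_cases h : f = p.2
    · subst h; simp [ih]
    · simp [h, ih, Ne.symm h]


-- 10. A's all-pairs containment pass equals B's per-frequency-group pass
lemma filter_stage (L : List (String × Int)) :
    L.foldl (fun result p =>
      let is_contained := L.any (fun q =>
        decide (p.1 ≠ q.1) && PySem.Str.isIn p.1 q.1 && decide (p.2 = q.2))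
      if is_contained then result else result ++ [p]) []
    = L.filter (fun p =>
        ((L.foldl (fun (d : PySem.Dict Int (List String)) p =>
            d.insert p.2 (d.getD p.2 [] ++ [p.1])) PySem.Dict.empty).getD p.2 []).all
          (fun t => p.1 == t || ! PySem.Str.isIn p.1 t)) := by
  have flip_if : ∀ (c : Bool) (r : List (String × Int)) (p : String × Int),
      (if c then r else r ++ [p]) = (if !c then r ++ [p] else r) := by
    intro c r p; cases c <;> simp
  have h1 : (fun (result : List (String × Int)) p =>
      let is_contained := L.any (fun q =>
        decide (p.1 ≠ q.1) && PySem.Str.isIn p.1 q.1 && decide (p.2 = q.2))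
      if is_contained then result else result ++ [p])
    = (fun result p => if (! L.any (fun q =>
        decide (p.1 ≠ q.1) && PySem.Str.isIn p.1 q.1 && decide (p.2 = q.2))) then result ++ [p] else result) := by
    funext result p
    exact flip_if _ result p
  rw [h1, PySem.List.foldl_append_if_eq_filter, List.nil_append]
  apply List.filter_congr
  intro p _
  rw [group_getD L p.2]
  simp only [List.all_eq_not_any_not]
  congr 1
  rw [List.any_map, List.any_filter]
  apply PySem.List.any_congr_mem
  intro q _
  simp only [Function.comp_apply]
  rw [show (decide (q.2 = p.2)) = decide (p.2 = q.2) from decide_eq_decide.mpr eq_comm]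
  by_cases h1 : p.1 = q.1 <;> by_cases h2 : p.2 = q.2 <;>
    cases h3 : PySem.Str.isIn p.1 q.1 <;>
      simp [h1, h2, h3]


-- ===== VERDICT (by name: the statement is the Claim_ definition above) =====
theorem find_sorted_substrings_spec : Claim_equal_find_sorted_substrings := by
  intro s _
  unfold Spec_find_sorted_substrings find_sorted_substrings find_sorted_substrings_alt
  dsimp only
  rw [dictA_eq_counter]
  have hperm : ((PySem.Dict.counter ((build_suffix_array s).flatMap (pvInner s))).items.filter
      (fun p => decide (p.2 ≥ 2))).Perm
      (((PySem.List.sorted ((PySem.List.pyRange 0 (PySem.Str.len s) 1).flatMap (fun i =>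
          (PySem.List.pyRange (i + 2) (PySem.Str.len s + 1) 1).map (fun j =>
            PySem.Str.slice s (some i) (some j)))) (fun t => t)).foldl (fun counted t =>
        match counted.getLast? with
        | some (u, c) => if u = t then counted.dropLast ++ [(u, c + 1)] else counted ++ [(t, 1)]
        | none => counted ++ [(t, 1)]) ([] : List (String × Int))).filter
          (fun p => decide (p.2 ≥ 2))) := by
    exact ((items_counter_perm _ _ (occ_perm s)).trans
      (counted_perm_counter_items
        ((PySem.List.pyRange 0 (PySem.Str.len s) 1).flatMap (pvInner s))).symm).filter _
  rw [sorted_stage_eq _ _ hperm, filter_stage]
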